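-- pv_equiv track=rewrite | github.com/rf-iasys/OEIS | OEIS_A005449.py | A005449
-- ===== SOURCE A (Python) =====
-- def A005449(n):
--     marked = []
--     current = 1
--     k = 1
--
--     while len(marked) < n:
--         k += current - 2
--         current += 3
--         marked.append(k)
--
--     return marked
-- ===== SOURCE B (Python) =====
-- def A005449(n):
--     return [i * (3 * i + 1) // 2 for i in range(n)]
-- ===== Notes on version B (the rewrite author's own statement) =====
-- stated objective: simpler
-- what changed: Replaced the stateful while-loop recurrence over (current, k) with a direct closed-form per-index formula i*(3*i+1)//2 over range(n).
import Mathlib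
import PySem

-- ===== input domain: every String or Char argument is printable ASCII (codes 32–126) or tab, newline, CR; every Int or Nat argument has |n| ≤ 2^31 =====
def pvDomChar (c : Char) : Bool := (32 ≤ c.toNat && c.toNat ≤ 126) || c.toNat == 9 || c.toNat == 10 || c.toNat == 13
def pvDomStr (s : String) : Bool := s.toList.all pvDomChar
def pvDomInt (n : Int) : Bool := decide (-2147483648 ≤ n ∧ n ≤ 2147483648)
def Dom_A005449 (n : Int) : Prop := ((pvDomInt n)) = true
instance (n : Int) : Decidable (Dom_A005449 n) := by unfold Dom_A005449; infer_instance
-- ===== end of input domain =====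

-- B lists the first n second pentagonal numbers by the closed form i*(3*i+1)//2
-- instead of A's running (current, k) accumulator; objective: simpler.

-- ===== PORT A =====
-- while len(marked) < n: k += current - 2; current += 3; marked.append(k)
-- (each iteration appends one element, so the loop runs exactly max(n,0) = n.toNat times;
--  the fuel counts the remaining iterations n - len(marked))
def A005449go (fuel : Nat) (marked : List Int) (current k : Int) : List Int :=
  match fuel with
  | 0 => marked
  | fuel + 1 => A005449go fuel (marked ++ [k + current - 2]) (current + 3) (k + current - 2)

def A005449 (n : Int) : List Int := A005449go n.toNat [] 1 1

-- ===== PORT B =====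
def A005449_alt (n : Int) : List Int :=
  (PySem.List.pyRange 0 n 1).map (fun i => PySem.Int.floordiv (i * (3 * i + 1)) 2)

-- ===== PRECONDITION & SPEC =====
def Spec_A005449 (n : Int) (out : List Int) : Prop := out = A005449_alt n
instance (n : Int) (out : List Int) : Decidable (Spec_A005449 n out) := by unfold Spec_A005449; infer_instance

-- ===== CLAIM (what is proved, stated in full; the proofs are below) =====
def Claim_equal_A005449 : Prop := ∀ (n : Int), Dom_A005449 n → Spec_A005449 n (A005449 n)

-- ===== LEMMAS AND PROOFS =====
def pvPent (i : Int) : Int := PySem.Int.floordiv (i * (3 * i + 1)) 2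

lemma pvPent_succ (i : Int) : pvPent (i + 1) = pvPent i + 3 * i + 2 := by
  have e : ∀ x : Int, PySem.Int.floordiv x 2 = x / 2 := fun x =>
    PySem.Int.floordiv_eq_ediv_of_pos (by omega)
  have h : (i + 1) * (3 * (i + 1) + 1) = i * (3 * i + 1) + (6 * i + 4) := by ring
  simp only [pvPent, e, h]
  omega

lemma A005449go_spec (fuel : Nat) : ∀ (marked : List Int) (m : Int),
    A005449go fuel marked (3 * m + 1) (pvPent m - (3 * m - 1))
      = marked ++ (PySem.List.pyRange m (m + fuel) 1).map pvPent := by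
  induction fuel with
  | zero =>
    intro marked m
    rw [A005449go, PySem.List.pyRange_one_eq_nil (by omega : m + (0 : Nat) ≤ m)]
    simp
  | succ fuel ih =>
    intro marked m
    rw [A005449go]
    have hk : pvPent m - (3 * m - 1) + (3 * m + 1) - 2 = pvPent m := by ring
    have hk' : pvPent m - (3 * m - 1) + (3 * m + 1) - 2
        = pvPent (m + 1) - (3 * (m + 1) - 1) := by rw [pvPent_succ]; ring
    have hcur : 3 * m + 1 + 3 = 3 * (m + 1) + 1 := by ring
    rw [hk', hcur, ih (marked ++ [pvPent (m + 1) - (3 * (m + 1) - 1)]) (m + 1)]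
    rw [PySem.List.pyRange_one_cons (by push_cast; omega : m < m + ((fuel : Nat) + 1 : Nat))]
    have hb : m + 1 + (fuel : Nat) = m + ((fuel : Nat) + 1 : Nat) := by push_cast; ring
    rw [hb]
    simp only [List.map_cons, List.append_assoc, List.singleton_append]
    rw [← hk', hk]

-- ===== VERDICT (by name: the statement is the Claim_ definition above) =====
theorem A005449_spec : Claim_equal_A005449 := by
  intro n _
  show A005449 n = A005449_alt n
  have h := A005449go_spec n.toNat [] 0
  have hp : pvPent 0 = 0 := by decide
  rw [hp] at h
  norm_num at h
  unfold A005449 A005449_alt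
  rw [h]
  have hmap : List.map pvPent = List.map (fun i => PySem.Int.floordiv (i * (3 * i + 1)) 2) := rfl
  rw [hmap]
  by_cases hn : 0 ≤ n
  · rw [max_eq_left hn]
  · rw [PySem.List.pyRange_one_eq_nil (by omega : n ≤ (0 : Int)),
        PySem.List.pyRange_one_eq_nil (by omega : max n 0 ≤ (0 : Int))]
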